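-- pv_equiv track=rewrite | github.com/iamlotus/facial-landmark | face_detect.py | filter_face
-- ===== SOURCE A (Python) =====
-- from collections import Counter
--
-- def pt_in_face(pt,face):
--     x,y,w,h=face
--     px,py=pt
--     return x<px<x+w and y<py<y+h
--
-- def filter_face(faces,pts):
--     """
--     filter the face fit most pts
--     :param faces:
--     :param pts:
--     :return: (the face with most pts, the pts it contains)
--     """
--     c = Counter()
--     c.update([id for id, face in enumerate(faces) for pt in pts if pt_in_face(pt,face)])
--     if not c:
--         return None,0
--     else:
--         target_face=sorted(c.items(), key=lambda n: n[1])[-1]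
--         target_face_id,num=target_face
--         return faces[target_face_id],num
-- ===== SOURCE B (Python) =====
-- def pt_in_face(pt, face):
--     x, y, w, h = face
--     px, py = pt
--     return x < px < x + w and y < py < y + h
--
-- def filter_face(faces, pts):
--     """One ascending pass with a running best; no Counter, no sort.
--     `>=` plus ascending ids reproduces the stable-sort tie-break (largest id wins)."""
--     best_id = None
--     best_cnt = 0
--     for i, face in enumerate(faces):
--         cnt = sum(1 for pt in pts if pt_in_face(pt, face))
--         if cnt > 0 and cnt >= best_cnt:
--             best_id, best_cnt = i, cnt
--     if best_id is None:
--         return None, 0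
--     return faces[best_id], best_cnt
-- ===== Notes on version B (the rewrite author's own statement) =====
-- stated objective: simpler
-- what changed: Replaced the Counter built from a nested comprehension plus a stable sort of its items with a single ascending pass over enumerate(faces) that keeps a running (best_id, best_cnt), using >= so ties go to the largest id exactly as the stable sort's [-1] does.
import Mathlib
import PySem

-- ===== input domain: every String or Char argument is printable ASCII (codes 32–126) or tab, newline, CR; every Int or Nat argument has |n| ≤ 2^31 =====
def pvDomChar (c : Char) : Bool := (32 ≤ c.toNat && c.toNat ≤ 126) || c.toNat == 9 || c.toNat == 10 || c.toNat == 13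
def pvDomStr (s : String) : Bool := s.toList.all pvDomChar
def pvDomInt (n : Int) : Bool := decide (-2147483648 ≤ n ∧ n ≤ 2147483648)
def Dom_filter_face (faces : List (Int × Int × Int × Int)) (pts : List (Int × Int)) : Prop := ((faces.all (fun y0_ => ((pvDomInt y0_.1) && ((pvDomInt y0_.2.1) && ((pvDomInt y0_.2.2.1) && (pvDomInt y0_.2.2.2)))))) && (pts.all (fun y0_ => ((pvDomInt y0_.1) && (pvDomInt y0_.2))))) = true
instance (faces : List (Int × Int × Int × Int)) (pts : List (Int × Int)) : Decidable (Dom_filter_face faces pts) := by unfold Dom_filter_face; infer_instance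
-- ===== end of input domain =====

-- B replaces A's Counter-then-sort with a single ascending pass keeping a running best
-- (objective: simpler; the `>=` update reproduces the stable sort's largest-id tie-break).

-- ===== PORT A =====
-- pt_in_face(pt, face): x < px < x+w and y < py < y+h
def ptInFace (pt : Int × Int) (face : Int × Int × Int × Int) : Bool :=
  decide (face.1 < pt.1) && decide (pt.1 < face.1 + face.2.2.1) &&
  (decide (face.2.1 < pt.2) && decide (pt.2 < face.2.1 + face.2.2.2))

def filter_face (faces : List (Int × Int × Int × Int)) (pts : List (Int × Int)) :
    (Option (Int × Int × Int × Int)) × Int :=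
  -- c = Counter(); c.update([id for id, face in enumerate(faces) for pt in pts if pt_in_face(pt, face)])
  let c := PySem.Dict.counter
    ((PySem.List.enumerate faces).flatMap
      (fun p => (pts.filter (fun pt => ptInFace pt p.2)).map (fun _ => p.1)))
  if c.items = [] then (none, 0)
  else
    -- target_face = sorted(c.items(), key=lambda n: n[1])[-1]  (the default is unreachable: the list is nonempty)
    let target := PySem.List.pyGetD (PySem.List.sorted c.items (fun n => n.2) false) (-1) (0, 0)
    (PySem.List.pyGet? faces target.1, target.2)

-- ===== PORT B =====
def filter_face_alt (faces : List (Int × Int × Int × Int)) (pts : List (Int × Int)) :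
    (Option (Int × Int × Int × Int)) × Int :=
  let r := (PySem.List.enumerate faces).foldl
    (fun s p =>
      let cnt : Int := pts.countP (fun pt => ptInFace pt p.2)
      if 0 < cnt ∧ s.2 ≤ cnt then (some p.1, cnt) else s)
    ((none : Option Int), (0 : Int))
  match r.1 with
  | none => (none, 0)
  | some i => (PySem.List.pyGet? faces i, r.2)

-- ===== PRECONDITION & SPEC =====
def Spec_filter_face (faces : List (Int × Int × Int × Int)) (pts : List (Int × Int)) (out : (Option (Int × Int × Int × Int)) × Int) : Prop := out = filter_face_alt faces pts
instance (faces : List (Int × Int × Int × Int)) (pts : List (Int × Int)) (out : (Option (Int × Int × Int × Int)) × Int) : Decidable (Spec_filter_face faces pts out) := by unfold Spec_filter_face; infer_instance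

-- ===== CLAIM (what is proved, stated in full; the proofs are below) =====
def Claim_equal_filter_face : Prop := ∀ (faces : List (Int × Int × Int × Int)) (pts : List (Int × Int)), Dom_filter_face faces pts → Spec_filter_face faces pts (filter_face faces pts)

-- ===== LEMMAS AND PROOFS =====

-- the per-face hit count
def pvN (pts : List (Int × Int)) (f : Int × Int × Int × Int) : Nat :=
  pts.countP (fun pt => ptInFace pt f)

-- the (id, count) pairs of the faces with a positive count, in id order
def pvP (pts : List (Int × Int)) (e : List (Int × (Int × Int × Int × Int))) : List (Int × Int) :=
  e.filterMap (fun p => if pvN pts p.2 = 0 then none else some (p.1, (pvN pts p.2 : Int)))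

-- running "last maximum by second component"
def pvStep (acc : Option (Int × Int)) (p : Int × Int) : Option (Int × Int) :=
  match acc with
  | none => some p
  | some q => if q.2 ≤ p.2 then some p else some q

def pvToState : Option (Int × Int) → Option Int × Int
  | none => (none, 0)
  | some q => (some q.1, q.2)

lemma pvStep_some (l : List (Int × Int)) : ∀ q, ∃ r, l.foldl pvStep (some q) = some r := by
  induction l with
  | nil => exact fun q => ⟨q, rfl⟩
  | cons x l ih =>
    intro q
    simp only [List.foldl_cons, pvStep]
    split_ifs <;> exact ih _

lemma pvInsertBy_getLast (p : Int × Int) :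
    ∀ s : List (Int × Int), s.Pairwise (fun a b => a.2 ≤ b.2) →
      (PySem.List.insertBy (fun a b => decide (a.2 < b.2)) p s).getLast? = pvStep s.getLast? p := by
  intro s
  induction s with
  | nil => intro _; rfl
  | cons y ys ih =>
    intro hp
    by_cases hlt : p.2 < y.2
    · have heq : PySem.List.insertBy (fun a b => decide (a.2 < b.2)) p (y :: ys) = p :: y :: ys := by
        simp [PySem.List.insertBy, hlt]
      rw [heq, List.getLast?_cons_cons]
      obtain ⟨q, hq⟩ : ∃ q, (y :: ys).getLast? = some q := by
        rw [List.getLast?_eq_some_getLast (l := y :: ys) (by simp)]; exact ⟨_, rfl⟩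
      have hqmem : q ∈ y :: ys := List.mem_of_getLast? hq
      have hyq : y.2 ≤ q.2 := by
        rcases List.mem_cons.mp hqmem with h | h
        · rw [h]
        · exact (List.pairwise_cons.mp hp).1 _ h
      rw [hq, pvStep]
      have hnle : ¬ q.2 ≤ p.2 := by omega
      simp [hnle]
    · have hstep : PySem.List.insertBy (fun a b => decide (a.2 < b.2)) p (y :: ys)
          = y :: PySem.List.insertBy (fun a b => decide (a.2 < b.2)) p ys := by
        simp [PySem.List.insertBy, hlt]
      rw [hstep]
      cases ys with
      | nil =>
        have h1 : PySem.List.insertBy (fun a b => decide (a.2 < b.2)) p [] = [p] := rfl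
        rw [h1, List.getLast?_cons_cons]
        have hyp : y.2 ≤ p.2 := by omega
        simp [pvStep, hyp]
      | cons w ys' =>
        have hne : PySem.List.insertBy (fun a b => decide (a.2 < b.2)) p (w :: ys') ≠ [] := by
          intro h
          have hm := (PySem.List.mem_insertBy (before := fun a b => decide (a.2 < b.2))
            (x := p) (ys := w :: ys') (y := p)).mpr (Or.inl rfl)
          rw [h] at hm; exact absurd hm (by simp)
        obtain ⟨z, t, hz⟩ := List.exists_cons_of_ne_nil hne
        rw [hz, List.getLast?_cons_cons, ← hz, ih (List.pairwise_cons.mp hp).2,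
            List.getLast?_cons_cons]

lemma pvSortLast (l : List (Int × Int)) :
    (PySem.List.sorted l (fun n => n.2) false).getLast? = l.foldl pvStep none := by
  induction l using List.reverseRecOn with
  | nil => rfl
  | append_singleton l p ih =>
    rw [PySem.List.sorted_eq_foldl_insertBy, List.foldl_append,
        ← PySem.List.sorted_eq_foldl_insertBy]
    simp only [List.foldl_cons, List.foldl_nil]
    rw [pvInsertBy_getLast p _ (PySem.List.sorted_pairwise l (fun n => n.2)), ih,
        List.foldl_append]
    simp

lemma pvOfList_replicate (n : Nat) (i : Int) :
    PySem.Set.ofList (List.replicate n i) = if n = 0 then [] else [i] := by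
  induction n with
  | zero => rfl
  | succ n ih =>
    rw [List.replicate_succ', PySem.Set.ofList_append_singleton, ih]
    by_cases h : n = 0 <;> simp [h, PySem.Set.add_of_not_mem, PySem.Set.add_of_mem]

-- the Counter of A's comprehension lists exactly the (id, count) pairs of pvP
lemma pvItems_eq (pts : List (Int × Int)) :
    ∀ e : List (Int × (Int × Int × Int × Int)), (e.map (·.1)).Nodup →
      (PySem.Dict.counter
        (e.flatMap (fun p => (pts.filter (fun pt => ptInFace pt p.2)).map (fun _ => p.1)))).items
      = pvP pts e := by
  intro e
  induction e with
  | nil => intro _; rfl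
  | cons p e ih =>
    intro hnd
    have hnd' : (e.map (·.1)).Nodup := (List.nodup_cons.mp hnd).2
    have hni : p.1 ∉ e.map (·.1) := (List.nodup_cons.mp hnd).1
    rw [PySem.Dict.items_counter] at *
    have hblk : (pts.filter (fun pt => ptInFace pt p.2)).map (fun _ => p.1)
        = List.replicate (pvN pts p.2) p.1 := by
      rw [List.map_const', pvN, List.countP_eq_length_filter]
    have hmemfst : ∀ k, k ∈ e.flatMap
        (fun p => (pts.filter (fun pt => ptInFace pt p.2)).map (fun _ => p.1)) →
        k ∈ e.map (·.1) := by
      intro k hk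
      obtain ⟨q, hq, hk⟩ := List.mem_flatMap.mp hk
      obtain ⟨_, _, rfl⟩ := List.mem_map.mp hk
      exact List.mem_map.mpr ⟨q, hq, rfl⟩
    rw [List.flatMap_cons, hblk]
    by_cases h0 : pvN pts p.2 = 0
    · rw [h0]
      simp only [List.replicate_zero, List.nil_append]
      rw [ih hnd']
      simp [pvP, h0]
    · rw [PySem.Set.ofList_append, pvOfList_replicate, if_neg h0,
          PySem.Set.update_eq_append_filter]
      have hfilter : (PySem.Set.ofList (e.flatMap
          (fun p => (pts.filter (fun pt => ptInFace pt p.2)).map (fun _ => p.1)))).filter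
          (fun y => !(PySem.Set.contains [p.1] y))
          = PySem.Set.ofList (e.flatMap
          (fun p => (pts.filter (fun pt => ptInFace pt p.2)).map (fun _ => p.1))) := by
        apply List.filter_eq_self.mpr
        intro y hy
        have hy' := hmemfst y ((PySem.Set.mem_ofList _ _).mp hy)
        have : y ≠ p.1 := fun h => hni (h ▸ hy')
        simp [PySem.Set.contains_eq_listContains, this]
      rw [hfilter]
      have hcnt0 : ∀ k ∈ e.flatMap
          (fun p => (pts.filter (fun pt => ptInFace pt p.2)).map (fun _ => p.1)), k ≠ p.1 :=
        fun k hk h => hni (h ▸ hmemfst k hk)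
      simp only [List.singleton_append, List.map_cons]
      rw [List.count_append, List.count_replicate_self,
          List.count_eq_zero_of_not_mem (fun h => hcnt0 _ h rfl)]
      have htail : (PySem.Set.ofList (e.flatMap
            (fun p => (pts.filter (fun pt => ptInFace pt p.2)).map (fun _ => p.1)))).map
            (fun k => (k, ((List.replicate (pvN pts p.2) p.1 ++ e.flatMap
              (fun p => (pts.filter (fun pt => ptInFace pt p.2)).map (fun _ => p.1))).count k : Int)))
          = (PySem.Set.ofList (e.flatMap
            (fun p => (pts.filter (fun pt => ptInFace pt p.2)).map (fun _ => p.1)))).map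
            (fun k => (k, ((e.flatMap
              (fun p => (pts.filter (fun pt => ptInFace pt p.2)).map (fun _ => p.1))).count k : Int))) := by
        apply List.map_congr_left
        intro k hk
        have hk' := (PySem.Set.mem_ofList _ _).mp hk
        have hkne : k ≠ p.1 := hcnt0 k hk'
        rw [List.count_append, List.count_replicate, if_neg (by simpa using hkne.symm)]
        simp
      rw [htail, ih hnd']
      simp [pvP, h0]

-- B's loop is the pvStep fold over pvP
lemma pvFoldB (pts : List (Int × Int)) :
    ∀ (e : List (Int × (Int × Int × Int × Int))) (acc : Option (Int × Int)),
      e.foldl (fun s p =>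
          let cnt : Int := pts.countP (fun pt => ptInFace pt p.2)
          if 0 < cnt ∧ s.2 ≤ cnt then (some p.1, cnt) else s) (pvToState acc)
      = pvToState ((pvP pts e).foldl pvStep acc) := by
  intro e
  induction e with
  | nil => intro _; rfl
  | cons p e ih =>
    intro acc
    simp only [List.foldl_cons]
    by_cases h0 : pvN pts p.2 = 0
    · have hc : (pts.countP (fun pt => ptInFace pt p.2) : Int) = 0 := by
        rw [← pvN] at *; rw [h0]; rfl
      have hP : pvP pts (p :: e) = pvP pts e := by
        simp [pvP, h0]
      rw [hP]
      have hstate : (if 0 < (pts.countP (fun pt => ptInFace pt p.2) : Int) ∧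
          (pvToState acc).2 ≤ (pts.countP (fun pt => ptInFace pt p.2) : Int) then
            ((some p.1 : Option Int), (pts.countP (fun pt => ptInFace pt p.2) : Int))
          else pvToState acc) = pvToState acc := by
        rw [if_neg (by omega)]
      rw [hstate, ih]
    · have hc : (0 : Int) < (pts.countP (fun pt => ptInFace pt p.2) : Int) := by
        have hpos : 0 < pvN pts p.2 := Nat.pos_of_ne_zero h0
        rw [pvN] at hpos; exact_mod_cast hpos
      have hP : pvP pts (p :: e) = (p.1, (pvN pts p.2 : Int)) :: pvP pts e := by
        simp [pvP, h0]
      rw [hP, List.foldl_cons]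
      have hstate : (if 0 < (pts.countP (fun pt => ptInFace pt p.2) : Int) ∧
          (pvToState acc).2 ≤ (pts.countP (fun pt => ptInFace pt p.2) : Int) then
            ((some p.1 : Option Int), (pts.countP (fun pt => ptInFace pt p.2) : Int))
          else pvToState acc) = pvToState (pvStep acc (p.1, (pvN pts p.2 : Int))) := by
        cases acc with
        | none =>
          rw [if_pos ⟨hc, by simp [pvToState]⟩]
          simp [pvToState, pvStep, pvN]
        | some q =>
          by_cases hle : q.2 ≤ (pvN pts p.2 : Int)
          · have hle' : q.2 ≤ (pts.countP (fun pt => ptInFace pt p.2) : Int) := by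
              simpa [pvN] using hle
            rw [if_pos ⟨hc, by simpa [pvToState] using hle'⟩]
            simp [pvToState, pvStep, hle', pvN]
          · rw [if_neg (by simp [pvToState]; intro _; rw [← pvN] at *; omega)]
            simp [pvToState, pvStep, hle]
      rw [hstate, ih]

-- ===== VERDICT (by name: the statement is the Claim_ definition above) =====
theorem filter_face_spec : Claim_equal_filter_face := by
  intro faces pts _
  unfold Spec_filter_face filter_face filter_face_alt
  have hnd : ((PySem.List.enumerate faces).map (·.1)).Nodup := by
    rw [PySem.List.map_fst_enumerate]
    exact PySem.List.nodup_pyRange_one _ _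
  simp only []
  rw [pvItems_eq pts _ hnd]
  have hfold := pvFoldB pts (PySem.List.enumerate faces) none
  rw [show pvToState none = ((none : Option Int), (0 : Int)) from rfl] at hfold
  rw [hfold]
  by_cases hP : pvP pts (PySem.List.enumerate faces) = []
  · rw [if_pos hP, hP]
    rfl
  · rw [if_neg hP]
    obtain ⟨x, l, hx⟩ := List.exists_cons_of_ne_nil hP
    obtain ⟨r, hr⟩ : ∃ r, (pvP pts (PySem.List.enumerate faces)).foldl pvStep none = some r := by
      rw [hx, List.foldl_cons]
      exact pvStep_some l x
    have hsne : PySem.List.sorted (pvP pts (PySem.List.enumerate faces)) (fun n => n.2) false ≠ [] := by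
      rw [Ne, PySem.List.sorted_eq_nil_iff]; exact hP
    have hlast : (PySem.List.sorted (pvP pts (PySem.List.enumerate faces)) (fun n => n.2) false).getLast?
        = some r := by rw [pvSortLast, hr]
    have htarget : PySem.List.pyGetD
        (PySem.List.sorted (pvP pts (PySem.List.enumerate faces)) (fun n => n.2) false) (-1) ((0 : Int), (0 : Int)) = r := by
      rw [PySem.List.pyGetD_neg_one _ _ hsne]
      rw [List.getLast?_eq_some_getLast hsne] at hlast
      exact Option.some_inj.mp hlast
    rw [htarget, hr]
    rfl
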